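-- pv_equiv track=rewrite | github.com/manavchauhan18/CI-Intelligence | agents/test_agent/main.py | _identify_untested_paths
-- ===== SOURCE A (Python) =====
-- from typing import Dict, Any, List
--
-- def _identify_untested_paths(impl_files: List[str], test_files: List[str]) -> List[str]:
--     """Identify implementation files without corresponding tests."""
--     untested = []
--
--     for impl_file in impl_files:
--         # Skip certain file types
--         if any(impl_file.endswith(x) for x in ['.md', '.json', '.yaml', '.yml', '.txt']):
--             continue
--
--         # Check if there's a corresponding test file
--         base_name = impl_file.rsplit('.', 1)[0]
--         has_test = any(base_name in test_file for test_file in test_files)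
--
--         if not has_test:
--             untested.append(impl_file)
--
--     return untested
-- ===== SOURCE B (Python) =====
-- from typing import List
--
-- _SKIP_SUFFIXES = ('.md', '.json', '.yaml', '.yml', '.txt')
--
-- def _identify_untested_paths(impl_files: List[str], test_files: List[str]) -> List[str]:
--     """Identify implementation files without corresponding tests.
--
--     Inverts the loop order: iterate once over test_files, shrinking a set
--     of still-untested base names (early exit when it empties), then keep
--     the candidates whose base survived.
--     """
--     candidates = [f for f in impl_files if not f.endswith(_SKIP_SUFFIXES)]
--     untested_bases = {f.rsplit('.', 1)[0] for f in candidates}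
--     for t in test_files:
--         if not untested_bases:
--             break
--         untested_bases = {b for b in untested_bases if b not in t}
--     return [f for f in candidates if f.rsplit('.', 1)[0] in untested_bases]
-- ===== Notes on version B (the rewrite author's own statement) =====
-- stated objective: alternative
-- what changed: Inverts the loop nesting: instead of scanning all test_files once per impl file, B makes one pass over test_files that shrinks a set of still-untested base names (with early exit once empty), then filters the pre-computed candidate list by membership in the surviving set.
import Mathlib
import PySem

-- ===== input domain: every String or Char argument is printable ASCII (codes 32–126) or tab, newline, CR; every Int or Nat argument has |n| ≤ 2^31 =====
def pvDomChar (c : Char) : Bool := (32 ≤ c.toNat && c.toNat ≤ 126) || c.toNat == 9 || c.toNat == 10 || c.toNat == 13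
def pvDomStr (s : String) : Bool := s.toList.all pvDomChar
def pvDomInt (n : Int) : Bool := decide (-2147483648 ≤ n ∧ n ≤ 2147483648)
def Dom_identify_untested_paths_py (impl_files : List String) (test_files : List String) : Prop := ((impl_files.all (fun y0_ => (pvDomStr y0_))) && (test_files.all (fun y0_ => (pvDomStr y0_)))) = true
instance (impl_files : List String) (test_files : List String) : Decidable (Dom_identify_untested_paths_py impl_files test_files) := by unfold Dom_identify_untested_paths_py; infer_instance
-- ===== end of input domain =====

-- B inverts the loop nesting: one pass over test_files shrinks a set of still-
-- untested base names (early exit when empty), then the candidate list is filtered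
-- by membership in the surviving set (objective: alternative algorithm, same cost).


-- ===== PORT A =====
-- impl_file.rsplit('.', 1)[0], ported by hand via rfind (exact: the part before the
-- last '.', or the whole string when there is no '.'); used verbatim by both Pythons.
def pvBase (s : String) : List Char :=
  let i := PySem.Chars.rfind s.toList ['.']
  if i = -1 then s.toList else s.toList.take i.toNat

def identify_untested_paths_py (impl_files : List String) (test_files : List String) : List String :=
  impl_files.foldl
    (fun untested impl_file =>
      -- any(impl_file.endswith(x) for x in ['.md', '.json', '.yaml', '.yml', '.txt'])
      if [".md", ".json", ".yaml", ".yml", ".txt"].any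
           (fun x => PySem.Chars.endswith impl_file.toList x.toList) then untested
      else
        let base_name := pvBase impl_file
        let has_test := test_files.any
          (fun test_file => PySem.Chars.isIn base_name test_file.toList)
        if !has_test then untested ++ [impl_file] else untested)
    []

-- ===== PORT B =====
-- _SKIP_SUFFIXES; impl_file.endswith(tuple) = any of the suffixes (exact)
def pvSkipSuffixes : List String := [".md", ".json", ".yaml", ".yml", ".txt"]

def pvSkip (f : String) : Bool :=
  pvSkipSuffixes.any (fun x => PySem.Chars.endswith f.toList x.toList)

-- Source B's for-loop over test_files with break: shrink the set of untested bases;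
-- the set comprehension is a filter of the Set (result consumed only by membership).
def pvShrink (s : PySem.Set (List Char)) (ts : List String) : PySem.Set (List Char) :=
  match ts with
  | [] => s
  | t :: ts' =>
      if s.isEmpty then s
      else pvShrink (s.filter (fun b => !PySem.Chars.isIn b t.toList)) ts'

def identify_untested_paths_py_alt (impl_files : List String) (test_files : List String) : List String :=
  let candidates := impl_files.filter (fun f => !pvSkip f)
  let untested_bases : PySem.Set (List Char) :=
    PySem.Set.ofList (candidates.map (fun f => pvBase f))
  let final := pvShrink untested_bases test_files
  candidates.filter (fun f => final.contains (pvBase f))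

-- ===== PRECONDITION & SPEC =====
def Spec_identify_untested_paths_py (impl_files : List String) (test_files : List String) (out : List String) : Prop := out = identify_untested_paths_py_alt impl_files test_files
instance (impl_files : List String) (test_files : List String) (out : List String) : Decidable (Spec_identify_untested_paths_py impl_files test_files out) := by unfold Spec_identify_untested_paths_py; infer_instance

-- ===== CLAIM (what is proved, stated in full; the proofs are below) =====
def Claim_equal_identify_untested_paths_py : Prop := ∀ (impl_files : List String) (test_files : List String), Dom_identify_untested_paths_py impl_files test_files → Spec_identify_untested_paths_py impl_files test_files (identify_untested_paths_py impl_files test_files)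

-- ===== LEMMAS AND PROOFS =====

-- A's skip guard and its inner any-scan, named for the proofs
def pvHasA (test_files : List String) (f : String) : Bool :=
  test_files.any (fun t => PySem.Chars.isIn (pvBase f) t.toList)

-- A's foldl-with-append is a filter
lemma pv_foldl_filter (p q : String → Bool) (l : List String) (acc : List String) :
    l.foldl (fun u f => if p f then u else if !q f then u ++ [f] else u) acc
      = acc ++ l.filter (fun f => !p f && !q f) := by
  induction l generalizing acc with
  | nil => simp
  | cons f fs ih =>
    simp only [List.foldl_cons, List.filter_cons]
    by_cases hp : p f = true
    · rw [if_pos hp, ih]; simp [hp]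
    · by_cases hq : q f = true
      · rw [if_neg hp, if_neg (by simp [hq]), ih]; simp [hp, hq]
      · rw [if_neg hp, if_pos (by simp [hq]), ih]; simp [hp, hq]

-- a base survives the shrinking pass iff it was there and matches no test file
lemma pv_mem_shrink (b : List Char) :
    ∀ (ts : List String) (s : PySem.Set (List Char)),
      b ∈ pvShrink s ts ↔ b ∈ s ∧ ∀ t ∈ ts, ¬ PySem.Chars.isIn b t.toList = true := by
  intro ts
  induction ts with
  | nil => intro s; simp [pvShrink]
  | cons t ts' ih =>
    intro s
    unfold pvShrink
    by_cases he : s.isEmpty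
    · rw [if_pos he]
      rw [List.isEmpty_iff] at he
      subst he
      simp
    · rw [if_neg he, ih]
      simp only [List.mem_filter, List.mem_cons]
      constructor
      · rintro ⟨⟨hb, hne⟩, hall⟩
        refine ⟨hb, ?_⟩
        rintro t' (rfl | ht')
        · simpa using hne
        · exact hall t' ht'
      · rintro ⟨hb, hall⟩
        exact ⟨⟨hb, by simpa using hall t (Or.inl rfl)⟩,
               fun t' ht' => hall t' (Or.inr ht')⟩

-- ===== VERDICT (by name: the statement is the Claim_ definition above) =====
theorem identify_untested_paths_py_spec : Claim_equal_identify_untested_paths_py := by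
  intro impl_files test_files _hdom
  unfold Spec_identify_untested_paths_py
  have hA : identify_untested_paths_py impl_files test_files
      = impl_files.filter (fun f => !pvSkip f && !pvHasA test_files f) := by
    have h := pv_foldl_filter pvSkip (pvHasA test_files) impl_files []
    simp only [pvSkip, pvSkipSuffixes, pvHasA] at h
    unfold identify_untested_paths_py
    exact h.trans (List.nil_append _)
  rw [hA]
  show _ = (impl_files.filter (fun f => !pvSkip f)).filter _
  rw [List.filter_filter]
  apply List.filter_congr
  intro f _hf
  by_cases hs : pvSkip f = true
  · simp [hs]
  · simp only [hs, Bool.not_false, Bool.and_true, Bool.true_and]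
    rw [Bool.eq_iff_iff, PySem.Set.contains_iff, pv_mem_shrink, PySem.Set.mem_ofList]
    unfold pvHasA
    simp only [Bool.not_eq_eq_eq_not, Bool.not_true, List.any_eq_false]
    constructor
    · intro hall
      exact ⟨List.mem_map_of_mem (List.mem_filter.mpr ⟨_hf, by simp [hs]⟩), hall⟩
    · rintro ⟨_, hall⟩; exact hall
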